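-- pv_equiv track=rewrite | github.com/knosence/project-vela | prototypes/python/vela/governance.py | _entry_blocks
-- ===== SOURCE A (Python) =====
-- def _entry_blocks(active_section: str) -> list[str]:
--     blocks: list[str] = []
--     current: list[str] = []
--     for line in active_section.splitlines():
--         if line.startswith("- "):
--             if current:
--                 blocks.append("\n".join(current).strip())
--             current = [line]
--             continue
--         if current:
--             if line.startswith("### ") or line.startswith("## "):
--                 break
--             if line.strip():
--                 current.append(line)
--     if current:
--         blocks.append("\n".join(current).strip())
--     return [block for block in blocks if not block.startswith("- Detailed entries moved")]
-- ===== SOURCE B (Python) =====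
-- def _entry_blocks(active_section: str) -> list[str]:
--     lines = active_section.splitlines()
--     i = 0
--     while i < len(lines) and not lines[i].startswith("- "):
--         i += 1
--     if i == len(lines):
--         return []
--     head, rest = lines[i], lines[i + 1:]
--     j = 0
--     while j < len(rest) and not (rest[j].startswith("### ") or rest[j].startswith("## ")):
--         j += 1
--     groups = [[head]]
--     for line in rest[:j]:
--         if line.startswith("- "):
--             groups.append([line])
--         elif line.strip():
--             groups[-1].append(line)
--     out = ["\n".join(g).strip() for g in groups]
--     return [b for b in out if not b.startswith("- Detailed entries moved")]
-- ===== Notes on version B (the rewrite author's own statement) =====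
-- stated objective: simpler
-- what changed: Replaces A's single streaming loop with mutable blocks/current accumulators and an in-loop break by a phased decomposition: locate the first entry-opening dash line, truncate at the first subsequent heading line, group the remaining lines into blocks, then join/strip/filter.
import Mathlib
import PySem

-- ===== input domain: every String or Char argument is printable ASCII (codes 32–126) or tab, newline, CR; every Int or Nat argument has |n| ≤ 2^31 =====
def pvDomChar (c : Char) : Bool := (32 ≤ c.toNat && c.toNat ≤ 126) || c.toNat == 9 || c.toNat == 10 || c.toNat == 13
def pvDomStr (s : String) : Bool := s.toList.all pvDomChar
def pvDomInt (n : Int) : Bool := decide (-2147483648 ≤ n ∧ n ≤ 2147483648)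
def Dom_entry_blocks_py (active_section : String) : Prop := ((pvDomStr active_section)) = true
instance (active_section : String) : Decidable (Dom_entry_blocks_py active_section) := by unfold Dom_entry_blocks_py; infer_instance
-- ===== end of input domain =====

-- B replaces A's single streaming accumulator loop by phases: find the first "- " line,
-- truncate at the first heading after it, group the remaining lines, then join/strip/filter
-- (objective: simpler decomposition; same cost).

-- ===== PORT A =====
-- the streaming loop of A: state (blocks, current); heading line while a block is open = break
def pvGoA : List String → List String → List String → List String
  | [], blocks, current =>
      if current.isEmpty then blocks
      else blocks ++ [PySem.Str.strip (PySem.Str.join "\n" current)]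
  | line :: rest, blocks, current =>
      if PySem.Str.startswith line "- " then
        pvGoA rest (if current.isEmpty then blocks
                    else blocks ++ [PySem.Str.strip (PySem.Str.join "\n" current)]) [line]
      else if current.isEmpty then pvGoA rest blocks current
      else if PySem.Str.startswith line "### " || PySem.Str.startswith line "## " then
        -- break: flush current (it is nonempty here) as the final `if current:` does
        blocks ++ [PySem.Str.strip (PySem.Str.join "\n" current)]
      else if PySem.Str.strip line = "" then pvGoA rest blocks current
      else pvGoA rest blocks (current ++ [line])

def entry_blocks_py (active_section : String) : List String :=
  (pvGoA (PySem.Str.splitlines active_section) [] []).filter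
    (fun b => !(PySem.Str.startswith b "- Detailed entries moved"))

-- ===== PORT B =====
-- grouping loop of Source B: each "- " line opens a group, nonblank lines join the last group
def pvGrp : List String → List String → List (List String)
  | [], cur => [cur]
  | line :: rest, cur =>
      if PySem.Str.startswith line "- " then cur :: pvGrp rest [line]
      else if PySem.Str.strip line = "" then pvGrp rest cur
      else pvGrp rest (cur ++ [line])

def entry_blocks_py_alt (active_section : String) : List String :=
  match (PySem.Str.splitlines active_section).dropWhile
      (fun l => !(PySem.Str.startswith l "- ")) with
  | [] => []
  | head :: rest =>
      let body := rest.takeWhile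
        (fun l => !(PySem.Str.startswith l "### " || PySem.Str.startswith l "## "))
      ((pvGrp body [head]).map (fun g => PySem.Str.strip (PySem.Str.join "\n" g))).filter
        (fun b => !(PySem.Str.startswith b "- Detailed entries moved"))

-- ===== PRECONDITION & SPEC =====
def Spec_entry_blocks_py (active_section : String) (out : List String) : Prop := out = entry_blocks_py_alt active_section
instance (active_section : String) (out : List String) : Decidable (Spec_entry_blocks_py active_section out) := by unfold Spec_entry_blocks_py; infer_instance

-- ===== CLAIM (what is proved, stated in full; the proofs are below) =====
def Claim_equal_entry_blocks_py : Prop := ∀ (active_section : String), Dom_entry_blocks_py active_section → Spec_entry_blocks_py active_section (entry_blocks_py active_section)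

-- ===== LEMMAS AND PROOFS =====

-- a "- " line is never a heading line
lemma pv_dash_not_heading (l : List Char) (h : PySem.Chars.startswith l ['-', ' '] = true) :
    PySem.Chars.startswith l ['#', '#', '#', ' '] = false ∧
      PySem.Chars.startswith l ['#', '#', ' '] = false := by
  rw [PySem.Chars.startswith_iff] at h
  rcases h with ⟨t, ht⟩
  constructor <;>
  · rw [← Bool.not_eq_true, PySem.Chars.startswith_iff]
    rintro ⟨u, hu⟩
    rw [← ht] at hu
    simp at hu

-- A's loop skips lines until the first "- " line while no block is open
lemma pv_goA_skip (lines : List String) :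
    pvGoA lines [] [] =
      pvGoA (lines.dropWhile (fun l => !(PySem.Str.startswith l "- "))) [] [] := by
  induction lines with
  | nil => rfl
  | cons l rest ih =>
      by_cases h : PySem.Chars.startswith l.toList ['-', ' '] = true
      · simp [List.dropWhile, h]
      · simp only [Bool.not_eq_true] at h
        simp [pvGoA, List.dropWhile, h, ih]

-- with a block open, A's loop is B's grouping of the lines up to the first heading
lemma pv_goA_grp (lines : List String) : ∀ (blocks cur : List String), cur ≠ [] →
    pvGoA lines blocks cur =
      blocks ++ (pvGrp (lines.takeWhile
          (fun l => !(PySem.Str.startswith l "### " || PySem.Str.startswith l "## "))) cur).map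
        (fun g => PySem.Str.strip (PySem.Str.join "\n" g)) := by
  induction lines with
  | nil =>
      intro blocks cur hcur
      simp [pvGoA, pvGrp, List.isEmpty_iff, hcur]
  | cons l rest ih =>
      intro blocks cur hcur
      by_cases hd : PySem.Chars.startswith l.toList ['-', ' '] = true
      · obtain ⟨h3, h2⟩ := pv_dash_not_heading l.toList hd
        have ih' := fun b => ih b [l] (by simp)
        simp [pvGoA, List.takeWhile, pvGrp, hd, h3, h2, List.isEmpty_iff, hcur, ih']
      · simp only [Bool.not_eq_true] at hd
        by_cases h3 : PySem.Chars.startswith l.toList ['#', '#', '#', ' '] = true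
        · simp [pvGoA, List.takeWhile, pvGrp, hd, h3, List.isEmpty_iff, hcur]
        · simp only [Bool.not_eq_true] at h3
          by_cases h2 : PySem.Chars.startswith l.toList ['#', '#', ' '] = true
          · simp [pvGoA, List.takeWhile, pvGrp, hd, h3, h2, List.isEmpty_iff, hcur]
          · simp only [Bool.not_eq_true] at h2
            by_cases hs : PySem.Str.strip l = ""
            · simp [pvGoA, List.takeWhile, pvGrp, hd, h3, h2, hs, List.isEmpty_iff, hcur,
                ih _ cur hcur]
            · have ih' := fun b => ih b (cur ++ [l]) (by simp)
              simp [pvGoA, List.takeWhile, pvGrp, hd, h3, h2, hs, List.isEmpty_iff, hcur, ih']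

-- ===== VERDICT (by name: the statement is the Claim_ definition above) =====
theorem entry_blocks_py_spec : Claim_equal_entry_blocks_py := by
  intro s _
  unfold Spec_entry_blocks_py entry_blocks_py entry_blocks_py_alt
  rw [pv_goA_skip]
  cases hdw : (PySem.Str.splitlines s).dropWhile (fun l => !(PySem.Str.startswith l "- ")) with
  | nil => rfl
  | cons head rest =>
      have hne : List.dropWhile (fun l => !(PySem.Str.startswith l "- "))
          (PySem.Str.splitlines s) ≠ [] := by rw [hdw]; simp
      have h1 := List.head_dropWhile_not (fun l => !(PySem.Str.startswith l "- ")) hne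
      simp only [hdw, List.head_cons] at h1
      simp at h1
      have hx : pvGoA (head :: rest) [] [] = pvGoA rest [] [head] := by
        simp [pvGoA, h1]
      rw [hx, pv_goA_grp rest [] [head] (by simp)]
      simp
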